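-- pv_equiv track=rewrite | github.com/Jccunnin68/ElsieBot | ai_agent/handlers/ai_logic/query_detection.py | extract_tell_me_about_subject
-- ===== SOURCE A (Python) =====
-- from typing import Optional, Tuple, Dict, List, Any
--
-- def extract_tell_me_about_subject(user_message: str) -> Optional[str]:
--     """
--     Extract the subject from a 'tell me about' query.
--     Returns the subject if found, otherwise None.
--     """
--     # Variations of "tell me about"
--     tell_me_about_patterns = [
--         "tell me about ",
--         "tell me more about ",
--         "what can you tell me about ",
--         "can you tell me about ",
--         "tell me a story about",
--         "retrieve the",
--         "summarize"
--     ]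
--
--     # Convert to lowercase for case-insensitive matching
--     message_lower = user_message.lower().strip()
--
--     # Check each pattern
--     for pattern in tell_me_about_patterns:
--         if message_lower.startswith(pattern):
--             # Extract subject by removing the pattern
--             subject = message_lower[len(pattern):].strip()
--
--             # Ensure subject is not empty and has some meaningful content
--             if subject and len(subject) > 2:
--                 return subject
--
--     return None
-- ===== SOURCE B (Python) =====
-- from typing import Optional
--
-- # The seven trigger phrases. None is a prefix of another, so the trie below has
-- # exactly one accepting node reachable along any given message.
-- _PATTERNS = (
--     "tell me about ",
--     "tell me more about ",
--     "what can you tell me about ",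
--     "can you tell me about ",
--     "tell me a story about",
--     "retrieve the",
--     "summarize",
-- )
--
--
-- def _build_dfa(patterns):
--     """Compile the phrases into a trie/DFA: numbered states, a (state, char) ->
--     state transition table and the set of accepting states."""
--     transitions = {}
--     accepting = set()
--     next_state = 1
--     for pat in patterns:
--         state = 0
--         for ch in pat:
--             key = (state, ch)
--             if key not in transitions:
--                 transitions[key] = next_state
--                 next_state += 1
--             state = transitions[key]
--         accepting.add(state)
--     return transitions, accepting
--
--
-- _TRANS, _ACCEPT = _build_dfa(_PATTERNS)
--
--
-- def extract_tell_me_about_subject(user_message: str) -> Optional[str]: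
--     msg = user_message.lower().strip()
--     state = 0
--     i = 0
--     n = len(msg)
--     # Single left-to-right scan of the message through the DFA.
--     while state not in _ACCEPT:
--         if i >= n:
--             return None
--         nxt = _TRANS.get((state, msg[i]))
--         if nxt is None:
--             return None
--         state = nxt
--         i += 1
--     subject = msg[i:].strip()
--     return subject if subject and len(subject) > 2 else None
-- ===== Notes on version B (the rewrite author's own statement) =====
-- stated objective: alternative
-- what changed: Replaces A's loop over seven prefix patterns (each doing its own startswith scan) by a trie/DFA compiled once from the phrases and a single left-to-right scan of the message through its transition table.
import Mathlib
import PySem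

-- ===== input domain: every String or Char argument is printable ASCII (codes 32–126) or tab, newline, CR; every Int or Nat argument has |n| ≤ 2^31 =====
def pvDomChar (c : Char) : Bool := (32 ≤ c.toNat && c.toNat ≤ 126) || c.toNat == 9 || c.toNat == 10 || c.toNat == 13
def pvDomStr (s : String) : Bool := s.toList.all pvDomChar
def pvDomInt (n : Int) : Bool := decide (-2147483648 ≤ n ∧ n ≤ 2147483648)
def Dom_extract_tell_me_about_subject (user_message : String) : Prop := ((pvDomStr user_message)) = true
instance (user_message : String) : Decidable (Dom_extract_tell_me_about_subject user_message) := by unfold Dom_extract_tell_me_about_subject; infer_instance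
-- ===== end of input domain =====

-- B replaces A's per-pattern prefix loop by a trie/DFA compiled once from the seven
-- phrases and a single left-to-right scan of the message through it (alternative algorithm).

-- ===== PORT A =====
def pvPatterns : List (List Char) :=
  [ "tell me about ".toList
  , "tell me more about ".toList
  , "what can you tell me about ".toList
  , "can you tell me about ".toList
  , "tell me a story about".toList
  , "retrieve the".toList
  , "summarize".toList ]

-- the 'for pattern in tell_me_about_patterns' loop of A, on code-point lists
def pvLoopA (msg : List Char) : List (List Char) → Option (List Char)
  | [] => none
  | p :: ps =>
    if PySem.Chars.startswith msg p then
      let subject := PySem.Chars.strip (PySem.Chars.slice msg (some (p.length : Int)) none)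
      if subject ≠ [] ∧ subject.length > 2 then some subject else pvLoopA msg ps
    else pvLoopA msg ps

def extract_tell_me_about_subject (user_message : String) : Option String :=
  let message_lower := PySem.Chars.strip (PySem.Chars.lower user_message.toList)
  (pvLoopA message_lower pvPatterns).map String.ofList

-- ===== PORT B =====
-- Source B's _build_dfa: fold over the patterns, inner fold over the chars; the outer
-- accumulator is (transitions, accepting, next_state), the inner one (transitions, next_state, state).
def pvBuildDFA (patterns : List (List Char)) :
    PySem.Dict (Nat × Char) Nat × PySem.Set Nat × Nat :=
  patterns.foldl
    (fun acc pat =>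
      let res := pat.foldl
        (fun (st : PySem.Dict (Nat × Char) Nat × Nat × Nat) ch =>
          let key := (st.2.2, ch)
          match st.1.get? key with
          | some t => (st.1, st.2.1, t)
          | none => (st.1.insert key st.2.1, st.2.1 + 1, st.2.1))
        (acc.1, acc.2.2, 0)
      (res.1, PySem.Set.add acc.2.1 res.2.2, res.2.1))
    (PySem.Dict.empty, PySem.Set.empty, 1)

def pvDFA : PySem.Dict (Nat × Char) Nat × PySem.Set Nat × Nat := pvBuildDFA pvPatterns
def pvTrans : PySem.Dict (Nat × Char) Nat := pvDFA.1
def pvAccept : PySem.Set Nat := pvDFA.2.1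

-- Source B's while loop; instead of an index i into msg it carries msg[i:] and returns it
-- (the 'i >= n' guard is the [] case; the accept test comes first exactly as in the loop)
def pvWalk (trans : PySem.Dict (Nat × Char) Nat) (accept : PySem.Set Nat) :
    Nat → List Char → Option (List Char)
  | state, [] => if PySem.Set.contains accept state then some [] else none
  | state, c :: cs =>
    if PySem.Set.contains accept state then some (c :: cs)
    else
      match trans.get? (state, c) with
      | none => none
      | some t => pvWalk trans accept t cs

def extract_tell_me_about_subject_alt (user_message : String) : Option String :=
  let msg := PySem.Chars.strip (PySem.Chars.lower user_message.toList)
  match pvWalk pvTrans pvAccept 0 msg with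
  | none => none
  | some rest =>
    let subject := PySem.Chars.strip rest
    if subject ≠ [] ∧ subject.length > 2 then some (String.ofList subject) else none

-- ===== PRECONDITION & SPEC =====
def Spec_extract_tell_me_about_subject (user_message : String) (out : Option String) : Prop := out = extract_tell_me_about_subject_alt user_message
instance (user_message : String) (out : Option String) : Decidable (Spec_extract_tell_me_about_subject user_message out) := by unfold Spec_extract_tell_me_about_subject; infer_instance

-- ===== CLAIM (what is proved, stated in full; the proofs are below) =====
def Claim_equal_extract_tell_me_about_subject : Prop := ∀ (user_message : String), Dom_extract_tell_me_about_subject user_message → Spec_extract_tell_me_about_subject user_message (extract_tell_me_about_subject user_message)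

-- ===== LEMMAS AND PROOFS =====
set_option maxRecDepth 100000

-- the string of characters consumed on the way to each of the 108 DFA states
def pvMeanPairs : List (Nat × List Char) :=
[
  (0, "".toList), (1, "t".toList), (2, "te".toList),
  (3, "tel".toList), (4, "tell".toList), (5, "tell ".toList),
  (6, "tell m".toList), (7, "tell me".toList), (8, "tell me ".toList),
  (9, "tell me a".toList), (10, "tell me ab".toList), (11, "tell me abo".toList),
  (12, "tell me abou".toList), (13, "tell me about".toList), (14, "tell me about ".toList),
  (15, "tell me m".toList), (16, "tell me mo".toList), (17, "tell me mor".toList),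
  (18, "tell me more".toList), (19, "tell me more ".toList), (20, "tell me more a".toList),
  (21, "tell me more ab".toList), (22, "tell me more abo".toList), (23, "tell me more abou".toList),
  (24, "tell me more about".toList), (25, "tell me more about ".toList), (26, "w".toList),
  (27, "wh".toList), (28, "wha".toList), (29, "what".toList),
  (30, "what ".toList), (31, "what c".toList), (32, "what ca".toList),
  (33, "what can".toList), (34, "what can ".toList), (35, "what can y".toList),
  (36, "what can yo".toList), (37, "what can you".toList), (38, "what can you ".toList),
  (39, "what can you t".toList), (40, "what can you te".toList), (41, "what can you tel".toList),
  (42, "what can you tell".toList), (43, "what can you tell ".toList), (44, "what can you tell m".toList),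
  (45, "what can you tell me".toList), (46, "what can you tell me ".toList), (47, "what can you tell me a".toList),
  (48, "what can you tell me ab".toList), (49, "what can you tell me abo".toList), (50, "what can you tell me abou".toList),
  (51, "what can you tell me about".toList), (52, "what can you tell me about ".toList), (53, "c".toList),
  (54, "ca".toList), (55, "can".toList), (56, "can ".toList),
  (57, "can y".toList), (58, "can yo".toList), (59, "can you".toList),
  (60, "can you ".toList), (61, "can you t".toList), (62, "can you te".toList),
  (63, "can you tel".toList), (64, "can you tell".toList), (65, "can you tell ".toList),
  (66, "can you tell m".toList), (67, "can you tell me".toList), (68, "can you tell me ".toList),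
  (69, "can you tell me a".toList), (70, "can you tell me ab".toList), (71, "can you tell me abo".toList),
  (72, "can you tell me abou".toList), (73, "can you tell me about".toList), (74, "can you tell me about ".toList),
  (75, "tell me a ".toList), (76, "tell me a s".toList), (77, "tell me a st".toList),
  (78, "tell me a sto".toList), (79, "tell me a stor".toList), (80, "tell me a story".toList),
  (81, "tell me a story ".toList), (82, "tell me a story a".toList), (83, "tell me a story ab".toList),
  (84, "tell me a story abo".toList), (85, "tell me a story abou".toList), (86, "tell me a story about".toList),
  (87, "r".toList), (88, "re".toList), (89, "ret".toList),
  (90, "retr".toList), (91, "retri".toList), (92, "retrie".toList),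
  (93, "retriev".toList), (94, "retrieve".toList), (95, "retrieve ".toList),
  (96, "retrieve t".toList), (97, "retrieve th".toList), (98, "retrieve the".toList),
  (99, "s".toList), (100, "su".toList), (101, "sum".toList),
  (102, "summ".toList), (103, "summa".toList), (104, "summar".toList),
  (105, "summari".toList), (106, "summariz".toList), (107, "summarize".toList) ]

def pvMean (s : Nat) : List Char := ((pvMeanPairs.lookup s).getD [])

-- no pattern is a prefix of a different pattern
lemma pvPatterns_no_two : ∀ p ∈ pvPatterns, ∀ q ∈ pvPatterns, p = q ∨ (¬ p <+: q ∧ ¬ q <+: p) := by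
  decide

lemma pvPatterns_nodup : pvPatterns.Nodup := by decide

-- a state is accepting iff the consumed string is one of the patterns
lemma pv_accept_iff : ∀ s ∈ List.range 108,
    PySem.Set.contains pvAccept s = decide (pvMean s ∈ pvPatterns) := by decide

-- every transition goes between states < 108 and appends its character to the meaning
lemma pv_trans_items : ∀ e ∈ pvTrans.items,
    e.1.1 < 108 ∧ e.2 < 108 ∧ pvMean e.2 = pvMean e.1.1 ++ [e.1.2] := by decide

-- whenever the consumed string is a proper prefix of a pattern, a transition exists
lemma pv_complete : ∀ s ∈ List.range 108, ∀ p ∈ pvPatterns,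
    pvMean s <+: p → pvMean s ≠ p →
    (pvTrans.get? (s, p.getD (pvMean s).length ' ')).isSome := by decide

-- ---- A-side: the loop is a first-match lookup (at most one pattern matches) ----
lemma pv_match_unique {msg p q : List Char} (hp : p ∈ pvPatterns) (hq : q ∈ pvPatterns)
    (hpm : p <+: msg) (hqm : q <+: msg) : p = q := by
  rcases pvPatterns_no_two p hp q hq with h | ⟨h1, h2⟩
  · exact h
  · rcases List.prefix_or_prefix_of_prefix hpm hqm with h | h
    · exact absurd h h1
    · exact absurd h h2

lemma pvLoopA_none {msg : List Char} {l : List (List Char)}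
    (h : ∀ p ∈ l, PySem.Chars.startswith msg p = false) : pvLoopA msg l = none := by
  induction l with
  | nil => rfl
  | cons p ps ih =>
    simp only [pvLoopA, h p (by simp)]
    exact ih (fun q hq => h q (by simp [hq]))

lemma pvLoopA_eq_find (msg : List Char) (l : List (List Char)) (hsub : l.Sublist pvPatterns) :
    pvLoopA msg l =
      match l.find? (fun p => PySem.Chars.startswith msg p) with
      | none => none
      | some p =>
        let subject := PySem.Chars.strip (msg.drop p.length)
        if subject.length > 2 then some subject else none := by
  induction l with
  | nil => rfl
  | cons p ps ih =>
    have hps : ps.Sublist pvPatterns := ((List.sublist_cons_self p ps).trans hsub)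
    by_cases hm : PySem.Chars.startswith msg p = true
    · have hslice : PySem.Chars.slice msg (some (p.length : Int)) none = msg.drop p.length := by
        simp [PySem.List.slice_from_natCast msg p.length]
      have hfind : List.find? (fun q => PySem.Chars.startswith msg q) (p :: ps) = some p := by
        simp [hm]
      have hnomatch : ∀ q ∈ ps, PySem.Chars.startswith msg q = false := by
        intro q hq
        by_contra hne
        rw [Bool.not_eq_false] at hne
        have hqm : q <+: msg := (PySem.Chars.startswith_iff msg q).mp hne
        have hpm : p <+: msg := (PySem.Chars.startswith_iff msg p).mp hm
        have hpq : p = q :=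
          pv_match_unique (hsub.subset (by simp)) (hsub.subset (by simp [hq])) hpm hqm
        have hnd : (p :: ps).Nodup := hsub.nodup pvPatterns_nodup
        exact (List.nodup_cons.mp hnd).1 (hpq ▸ hq)
      rw [hfind]
      simp only [pvLoopA, hm, hslice]
      by_cases hlen : (PySem.Chars.strip (msg.drop p.length)).length > 2
      · have hnil : PySem.Chars.strip (msg.drop p.length) ≠ [] := by
          intro h0; rw [h0] at hlen; simp at hlen
        simp [hlen, hnil]
      · simp [pvLoopA_none hnomatch, hlen]
    · rw [Bool.not_eq_true] at hm
      have hfind : List.find? (fun q => PySem.Chars.startswith msg q) (p :: ps) =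
          List.find? (fun q => PySem.Chars.startswith msg q) ps := by
        simp [hm]
      rw [hfind]
      simp only [pvLoopA, hm]
      exact ih hps

-- ---- B-side: the DFA walk is the same first-match lookup ----
lemma pv_find?_unique {α : Type} {l : List α} {p : α → Bool} {a : α}
    (ha : a ∈ l) (hpa : p a = true) (huniq : ∀ b ∈ l, p b = true → b = a) :
    l.find? p = some a := by
  induction l with
  | nil => cases ha
  | cons b bs ih =>
    by_cases hb : p b = true
    · have : b = a := huniq b (by simp) hb
      subst this
      simp [List.find?, hpa]
    · rw [Bool.not_eq_true] at hb
      have ha' : a ∈ bs := by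
        rcases List.mem_cons.mp ha with rfl | h
        · exact absurd hpa (by simp [hb])
        · exact h
      simp only [List.find?, hb]
      exact ih ha' (fun c hc hpc => huniq c (by simp [hc]) hpc)

lemma pv_find?_congr {α : Type} {l : List α} {p q : α → Bool}
    (hpq : ∀ x ∈ l, p x = q x) : l.find? p = l.find? q := by
  induction l with
  | nil => rfl
  | cons b bs ih =>
    have hpb := hpq b (by simp)
    simp only [List.find?, hpb]
    cases hqb : q b with
    | true => rfl
    | false => exact ih (fun x hx => hpq x (by simp [hx]))

lemma pv_find?_map_congr {α β : Type} {l : List α} {p q : α → Bool} {f g : α → β}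
    (hpq : ∀ x ∈ l, p x = q x) (hfg : ∀ x ∈ l, p x = true → f x = g x) :
    (l.find? p).map f = (l.find? q).map g := by
  induction l with
  | nil => rfl
  | cons b bs ih =>
    have hpb := hpq b (by simp)
    by_cases hb : p b = true
    · simp [List.find?, hb, hpb ▸ hb, hfg b (by simp) hb]
    · rw [Bool.not_eq_true] at hb
      simp only [List.find?, hb, hpb ▸ hb]
      exact ih (fun x hx => hpq x (by simp [hx])) (fun x hx => hfg x (by simp [hx]))

lemma pv_walk_eq (rest : List Char) : ∀ (s : Nat), s < 108 →
    pvWalk pvTrans pvAccept s rest =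
      (pvPatterns.find? (fun p =>
          decide (pvMean s <+: p) && PySem.Chars.startswith rest (p.drop (pvMean s).length))).map
        (fun p => rest.drop (p.length - (pvMean s).length)) := by
  induction rest with
  | nil =>
    intro s hs
    by_cases hacc : PySem.Set.contains pvAccept s = true
    · have hmem : pvMean s ∈ pvPatterns := by
        have := pv_accept_iff s (List.mem_range.mpr hs)
        rw [hacc] at this; exact of_decide_eq_true this.symm
      have hfind : pvPatterns.find? (fun p =>
          decide (pvMean s <+: p) && PySem.Chars.startswith ([] : List Char) (p.drop (pvMean s).length)) = some (pvMean s) := by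
        apply pv_find?_unique hmem
        · simp [PySem.Chars.startswith_iff]
        · intro q hq hpq
          rw [Bool.and_eq_true, decide_eq_true_iff] at hpq
          rcases pvPatterns_no_two (pvMean s) hmem q hq with h | ⟨h1, _⟩
          · exact h.symm
          · exact absurd hpq.1 h1
      rw [pvWalk, if_pos hacc, hfind]
      simp
    · rw [Bool.not_eq_true] at hacc
      have hnmem : pvMean s ∉ pvPatterns := by
        have := pv_accept_iff s (List.mem_range.mpr hs)
        rw [hacc] at this
        exact of_decide_eq_false this.symm
      have hfind : pvPatterns.find? (fun p =>
          decide (pvMean s <+: p) && PySem.Chars.startswith ([] : List Char) (p.drop (pvMean s).length)) = none := by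
        rw [List.find?_eq_none]
        intro p hp
        rw [Bool.and_eq_true, decide_eq_true_iff, PySem.Chars.startswith_iff]
        rintro ⟨hpre, hnil⟩
        have hdrop : p.drop (pvMean s).length = [] := List.prefix_nil.mp hnil
        have hle : p.length ≤ (pvMean s).length := by
          have := List.drop_eq_nil_iff.mp hdrop; omega
        have heq : pvMean s = p := hpre.eq_of_length_le (by omega)
        exact hnmem (heq ▸ hp)
      rw [pvWalk, if_neg (by simpa [PySem.Set.contains] using hacc), hfind]
      rfl
  | cons c cs ih =>
    intro s hs
    by_cases hacc : PySem.Set.contains pvAccept s = true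
    · have hmem : pvMean s ∈ pvPatterns := by
        have := pv_accept_iff s (List.mem_range.mpr hs)
        rw [hacc] at this; exact of_decide_eq_true this.symm
      have hfind : pvPatterns.find? (fun p =>
          decide (pvMean s <+: p) && PySem.Chars.startswith (c :: cs) (p.drop (pvMean s).length)) = some (pvMean s) := by
        apply pv_find?_unique hmem
        · simp [PySem.Chars.startswith_iff]
        · intro q hq hpq
          rw [Bool.and_eq_true, decide_eq_true_iff] at hpq
          rcases pvPatterns_no_two (pvMean s) hmem q hq with h | ⟨h1, _⟩
          · exact h.symm
          · exact absurd hpq.1 h1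
      rw [pvWalk, if_pos hacc, hfind]
      simp
    · rw [Bool.not_eq_true] at hacc
      have hnmem : pvMean s ∉ pvPatterns := by
        have := pv_accept_iff s (List.mem_range.mpr hs)
        rw [hacc] at this
        exact of_decide_eq_false this.symm
      rw [pvWalk, if_neg (by simpa [PySem.Set.contains] using hacc)]
      cases htr : pvTrans.get? (s, c) with
      | none =>
        have hfind : pvPatterns.find? (fun p =>
            decide (pvMean s <+: p) && PySem.Chars.startswith (c :: cs) (p.drop (pvMean s).length)) = none := by
          rw [List.find?_eq_none]
          intro p hp
          rw [Bool.and_eq_true, decide_eq_true_iff, PySem.Chars.startswith_iff]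
          rintro ⟨hpre, hmatch⟩
          have hne : pvMean s ≠ p := fun h => hnmem (h ▸ hp)
          obtain ⟨t, rfl⟩ := hpre
          have ht : t ≠ [] := fun h => hne (by simp [h])
          obtain ⟨d, ds, rfl⟩ := List.exists_cons_of_ne_nil ht
          rw [List.drop_left] at hmatch
          obtain ⟨hdc, -⟩ := List.cons_prefix_cons.mp hmatch
          have hget : (pvMean s ++ d :: ds).getD (pvMean s).length ' ' = d := by
            simp [List.getD]
          have hsome := pv_complete s (List.mem_range.mpr hs) _ hp ⟨d :: ds, rfl⟩ (by simp)
          rw [hget, hdc, htr] at hsome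
          simp at hsome
        rw [hfind]; rfl
      | some t =>
        have hmemtr := PySem.Dict.mem_items_of_get?_eq_some pvTrans htr
        obtain ⟨hs1, ht108, hmean⟩ := pv_trans_items _ hmemtr
        dsimp only at hs1 ht108 hmean
        show pvWalk pvTrans pvAccept t cs = _
        rw [ih t ht108, hmean]
        refine (pv_find?_map_congr ?_ ?_).symm
        · intro p hp
          have hne : pvMean s ≠ p := fun h => hnmem (h ▸ hp)
          rw [Bool.eq_iff_iff, Bool.and_eq_true, Bool.and_eq_true,
            decide_eq_true_iff, decide_eq_true_iff,
            PySem.Chars.startswith_iff, PySem.Chars.startswith_iff]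
          constructor
          · rintro ⟨⟨t0, rfl⟩, hst⟩
            have ht0 : t0 ≠ [] := fun h => hne (by simp [h])
            obtain ⟨d, ds, rfl⟩ := List.exists_cons_of_ne_nil ht0
            rw [List.drop_left] at hst
            obtain ⟨hdc, hds⟩ := List.cons_prefix_cons.mp hst
            subst hdc
            refine ⟨⟨ds, by simp⟩, ?_⟩
            have : (pvMean s ++ d :: ds).drop ((pvMean s).length + 1) = ds := by
              have : pvMean s ++ d :: ds = (pvMean s ++ [d]) ++ ds := by simp
              rw [this]
              have hlen : (pvMean s ++ [d]).length = (pvMean s).length + 1 := by simp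
              rw [← hlen, List.drop_left]
            rw [List.length_append, List.length_singleton, this]
            exact hds
          · rintro ⟨⟨u, rfl⟩, hst⟩
            rw [List.length_append, List.length_singleton] at hst
            have hd1 : ((pvMean s ++ [c]) ++ u).drop ((pvMean s).length + 1) = u := by
              have hlen : (pvMean s ++ [c]).length = (pvMean s).length + 1 := by simp
              rw [← hlen, List.drop_left]
            rw [hd1] at hst
            refine ⟨⟨c :: u, by simp⟩, ?_⟩
            have hd2 : ((pvMean s ++ [c]) ++ u).drop (pvMean s).length = c :: u := by
              have : (pvMean s ++ [c]) ++ u = pvMean s ++ (c :: u) := by simp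
              rw [this, List.drop_left]
            rw [hd2]
            exact List.cons_prefix_cons.mpr ⟨rfl, hst⟩
        · intro p hp hpt
          rw [Bool.and_eq_true, decide_eq_true_iff] at hpt
          obtain ⟨⟨t0, rfl⟩, -⟩ := hpt
          have hne : pvMean s ≠ pvMean s ++ t0 := fun h => hnmem (h ▸ hp)
          have ht0 : t0 ≠ [] := fun h => hne (by simp [h])
          have hpos : 0 < t0.length := List.length_pos_iff.mpr ht0
          rw [List.length_append, List.length_append, List.length_singleton]
          have h1 : (pvMean s).length + t0.length - (pvMean s).length = t0.length := by omega
          have h2 : (pvMean s).length + t0.length - ((pvMean s).length + 1) = t0.length - 1 := by omega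
          rw [h1, h2]
          obtain ⟨d, ds, rfl⟩ := List.exists_cons_of_ne_nil ht0
          simp

lemma pvMean_zero : pvMean 0 = [] := rfl

-- ===== VERDICT (by name: the statement is the Claim_ definition above) =====
theorem extract_tell_me_about_subject_spec : Claim_equal_extract_tell_me_about_subject := by
  intro user_message _
  unfold Spec_extract_tell_me_about_subject
  unfold extract_tell_me_about_subject extract_tell_me_about_subject_alt
  simp only [pvLoopA_eq_find _ pvPatterns (List.Sublist.refl _)]
  rw [pv_walk_eq _ 0 (by norm_num)]
  rw [pvMean_zero]
  have hpred : ∀ p ∈ pvPatterns,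
      (decide (([] : List Char) <+: p) &&
        PySem.Chars.startswith (PySem.Chars.strip (PySem.Chars.lower user_message.toList)) (p.drop (List.length ([] : List Char)))) =
      PySem.Chars.startswith (PySem.Chars.strip (PySem.Chars.lower user_message.toList)) p := by
    intro p _; simp
  rw [pv_find?_congr hpred]
  cases h : pvPatterns.find? (fun p =>
      PySem.Chars.startswith (PySem.Chars.strip (PySem.Chars.lower user_message.toList)) p) with
  | none => simp
  | some p =>
    simp only [Option.map_some, List.length_nil, Nat.sub_zero]
    by_cases hlen :
        (PySem.Chars.strip ((PySem.Chars.strip (PySem.Chars.lower user_message.toList)).drop p.length)).length > 2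
    · have hne : PySem.Chars.strip ((PySem.Chars.strip (PySem.Chars.lower user_message.toList)).drop p.length) ≠ [] := by
        intro h0; rw [h0] at hlen; simp at hlen
      simp [hlen, hne]
    · simp [hlen]
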